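-- pv_equiv track=rewrite | github.com/wuyinan0126/final | tqa/reader/utils.py | load_chars
-- ===== SOURCE A (Python) =====
-- import unicodedata
--
-- def normalize(text):
--     return unicodedata.normalize('NFD', text)
--
-- def load_chars(examples):
--     """ 得到train_examples和dev_examples中的所有字符集合 """
--
--     def _add_chars(text):
--         for char_list in map(lambda word: list(word), text):
--             for char in char_list:
--                 char = normalize(char)
--                 chars.add(char)
--
--     chars = set()
--     for example in examples:
--         _add_chars(example['qtext'])
--         _add_chars(example['dtext'])
--     return chars
-- ===== SOURCE B (Python) =====
-- import unicodedata
--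
--
-- def normalize(text):
--     return unicodedata.normalize('NFD', text)
--
--
-- def load_chars(examples):
--     """Balanced divide-and-conquer: recursively split the example list in half,
--     build each half's character set, and combine halves with set union."""
--
--     def text_chars(text):
--         return {normalize(c) for word in text for c in word}
--
--     def gather(lo, hi):
--         if hi <= lo:
--             return set()
--         if hi == lo + 1:
--             example = examples[lo]
--             return text_chars(example['qtext']) | text_chars(example['dtext'])
--         mid = (lo + hi) // 2
--         return gather(lo, mid) | gather(mid, hi)
--
--     return gather(0, len(examples))
-- ===== Notes on version B (the rewrite author's own statement) =====
-- stated objective: alternative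
-- what changed: B replaces A's linear imperative accumulation (a shared set mutated by nested add-loops) with a balanced divide-and-conquer: it recurses on halves of the example list, builds small per-text sets by comprehension, and combines subresults with set union; Pre_ excludes examples missing the 'qtext' or 'dtext' key, on which both A and B raise KeyError.
import Mathlib
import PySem

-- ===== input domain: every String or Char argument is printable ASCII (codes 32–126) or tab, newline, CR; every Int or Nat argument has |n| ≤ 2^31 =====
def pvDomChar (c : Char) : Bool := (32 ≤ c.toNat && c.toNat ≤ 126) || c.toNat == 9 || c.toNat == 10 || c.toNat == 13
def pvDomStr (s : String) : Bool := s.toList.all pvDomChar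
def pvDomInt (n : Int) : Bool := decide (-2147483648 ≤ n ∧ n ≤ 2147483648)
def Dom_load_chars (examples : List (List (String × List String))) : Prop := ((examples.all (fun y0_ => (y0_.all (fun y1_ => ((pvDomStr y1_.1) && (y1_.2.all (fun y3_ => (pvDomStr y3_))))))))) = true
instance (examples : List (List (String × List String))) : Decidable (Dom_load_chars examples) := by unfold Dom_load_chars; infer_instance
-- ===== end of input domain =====

-- B replaces A's linear accumulation into one mutated set by a balanced divide-and-conquer over
-- the example list, combining per-text comprehension sets with set union. Both return a set, whose
-- Python iteration order is unmodelled: the ports return the distinct elements in first-insertion order.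

-- ===== PORT A =====
-- unicodedata.normalize('NFD', text): the identity on the printable-ASCII domain Dom (exact there)
def pvNorm (text : String) : String := text

-- `_add_chars(text)`: for each word, for each char: chars.add(normalize(char))
def pvAddChars (chars : PySem.Set String) (text : List String) : PySem.Set String :=
  text.foldl (fun acc word =>
    word.toList.foldl (fun a ch => PySem.Set.add a (pvNorm (String.ofList [ch]))) acc) chars

def load_chars (examples : List (List (String × List String))) : List String :=
  examples.foldl (fun chars ex =>
    pvAddChars (pvAddChars chars (((PySem.Dict.mk ex).get? "qtext").getD []))
      (((PySem.Dict.mk ex).get? "dtext").getD [])) PySem.Set.empty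

-- ===== PORT B =====
-- `text_chars(text)`: the set comprehension {normalize(c) for word in text for c in word}
def pvTextChars (text : List String) : PySem.Set String :=
  PySem.Set.ofList (text.flatMap (fun w => w.toList.map (fun c => pvNorm (String.ofList [c]))))

-- `gather(lo, hi)`; `examples[lo]` is ported as getD (B only indexes with 0 ≤ lo < len, exact there)
def pvGather (examples : List (List (String × List String))) (lo hi : Nat) : PySem.Set String :=
  if hi ≤ lo then PySem.Set.empty
  else if hi = lo + 1 then
    let ex := examples.getD lo []
    PySem.Set.union (pvTextChars (((PySem.Dict.mk ex).get? "qtext").getD []))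
                    (pvTextChars (((PySem.Dict.mk ex).get? "dtext").getD []))
  else
    PySem.Set.union (pvGather examples lo ((lo + hi) / 2)) (pvGather examples ((lo + hi) / 2) hi)
termination_by hi - lo
decreasing_by all_goals omega

def load_chars_alt (examples : List (List (String × List String))) : List String :=
  pvGather examples 0 examples.length

-- ===== PRECONDITION & SPEC =====
-- A raises KeyError when an example lacks the 'qtext' or 'dtext' key; exactly those inputs are excluded.
def Pre_load_chars (examples : List (List (String × List String))) : Prop :=
  ∀ ex ∈ examples,
    (PySem.Dict.mk ex).contains "qtext" = true ∧ (PySem.Dict.mk ex).contains "dtext" = true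
instance (examples : List (List (String × List String))) : Decidable (Pre_load_chars examples) := by
  unfold Pre_load_chars; infer_instance

def pvWitness_load_chars : (List (List (String × List String))) :=
  [[("qtext", ["ab", "b"]), ("dtext", ["c d"])]]

def Spec_load_chars (examples : List (List (String × List String))) (out : List String) : Prop := out = load_chars_alt examples
instance (examples : List (List (String × List String))) (out : List String) : Decidable (Spec_load_chars examples out) := by unfold Spec_load_chars; infer_instance

-- ===== CLAIM (what is proved, stated in full; the proofs are below) =====
def Claim_equal_load_chars : Prop := ∀ (examples : List (List (String × List String))), Dom_load_chars examples → Pre_load_chars examples → Spec_load_chars examples (load_chars examples)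

-- ===== LEMMAS AND PROOFS =====

-- the per-char strings one example contributes, in traversal order (proof abbreviation)
def pvCharsOf (ex : List (String × List String)) : List String :=
  ((((PySem.Dict.mk ex).get? "qtext").getD []) ++
   (((PySem.Dict.mk ex).get? "dtext").getD [])).flatMap
    (fun word => word.toList.map (fun c => String.ofList [c]))

-- the per-char strings of the slice examples[lo:hi] (proof abbreviation)
def pvSeg (examples : List (List (String × List String))) (lo hi : Nat) : List String :=
  ((examples.drop lo).take (hi - lo)).flatMap pvCharsOf

-- A's per-text loop is folding Set.add over the per-char strings of the text
theorem pvAddChars_eq (chars : PySem.Set String) (text : List String) :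
    pvAddChars chars text
      = (text.flatMap (fun word => word.toList.map (fun c => String.ofList [c]))).foldl
          PySem.Set.add chars := by
  induction text generalizing chars with
  | nil => rfl
  | cons w ws ih =>
    have hinner : w.toList.foldl (fun a ch => PySem.Set.add a (pvNorm (String.ofList [ch]))) chars
        = (w.toList.map (fun c => String.ofList [c])).foldl PySem.Set.add chars := by
      rw [List.foldl_map]; rfl
    simp only [pvAddChars] at ih ⊢
    rw [List.foldl_cons, List.flatMap_cons, List.foldl_append, ih, hinner]

-- A's outer loop is folding Set.add over the concatenated per-char strings
theorem pv_load_chars_foldl (examples : List (List (String × List String)))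
    (init : PySem.Set String) :
    examples.foldl (fun chars ex =>
      pvAddChars (pvAddChars chars (((PySem.Dict.mk ex).get? "qtext").getD []))
        (((PySem.Dict.mk ex).get? "dtext").getD [])) init
      = (examples.flatMap pvCharsOf).foldl PySem.Set.add init := by
  induction examples generalizing init with
  | nil => rfl
  | cons e es ih =>
    rw [List.foldl_cons, List.flatMap_cons, List.foldl_append, ih]
    congr 1
    rw [pvAddChars_eq, pvAddChars_eq, pvCharsOf, List.flatMap_append, List.foldl_append]

theorem pv_ofList_append {α : Type} [BEq α] [LawfulBEq α] (xs ys : List α) :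
    PySem.Set.ofList (xs ++ ys) = PySem.Set.union (PySem.Set.ofList xs) (PySem.Set.ofList ys) := by
  show _ = PySem.Set.update (PySem.Set.ofList xs) (PySem.Set.ofList ys)
  rw [PySem.Set.ofList_append, PySem.Set.update_eq_append_filter,
      PySem.Set.update_eq_append_filter, PySem.Set.ofList_ofList]

theorem pv_seg_split (examples : List (List (String × List String))) (lo mid hi : Nat)
    (h1 : lo ≤ mid) (h2 : mid ≤ hi) :
    pvSeg examples lo hi = pvSeg examples lo mid ++ pvSeg examples mid hi := by
  unfold pvSeg
  rw [← List.flatMap_append]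
  congr 1
  have hsum : hi - lo = (mid - lo) + (hi - mid) := by omega
  have hm : lo + (mid - lo) = mid := by omega
  rw [hsum, List.take_add, List.drop_drop, hm]

-- B's divide-and-conquer computes the distinct per-char strings of the slice, first occurrences first
theorem pv_gather_eq (examples : List (List (String × List String))) :
    ∀ n lo hi, hi - lo = n → hi ≤ examples.length →
      pvGather examples lo hi = PySem.Set.ofList (pvSeg examples lo hi) := by
  intro n
  induction n using Nat.strong_induction_on with
  | _ n ih =>
    intro lo hi hn hlen
    rw [pvGather]
    by_cases hle : hi ≤ lo
    · simp only [if_pos hle]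
      have : hi - lo = 0 := by omega
      unfold pvSeg
      rw [this]
      rfl
    · simp only [if_neg hle]
      by_cases hone : hi = lo + 1
      · simp only [if_pos hone]
        have hlt : lo < examples.length := by omega
        have hdrop : examples.drop lo = examples[lo] :: examples.drop (lo + 1) :=
          List.drop_eq_getElem_cons hlt
        have hget : examples.getD lo [] = examples[lo] := List.getD_eq_getElem _ _ hlt
        unfold pvSeg
        have htake : hi - lo = 1 := by omega
        rw [htake, hdrop]
        simp only [List.take_succ_cons, List.take_zero, List.flatMap_cons, List.flatMap_nil,
          List.append_nil]
        rw [pvCharsOf, List.flatMap_append, pv_ofList_append, hget]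
        rfl
      · simp only [if_neg hone]
        have h2 : lo + 2 ≤ hi := by omega
        have hm1 : lo ≤ (lo + hi) / 2 := by omega
        have hm2 : (lo + hi) / 2 ≤ hi := by omega
        rw [ih ((lo + hi) / 2 - lo) (by omega) lo _ rfl (by omega),
            ih (hi - (lo + hi) / 2) (by omega) _ hi rfl hlen,
            pv_seg_split examples lo ((lo + hi) / 2) hi hm1 hm2, pv_ofList_append]

-- ===== VERDICT (by name: the statement is the Claim_ definition above) =====
theorem load_chars_spec : Claim_equal_load_chars := by
  intro examples _ _
  unfold Spec_load_chars load_chars load_chars_alt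
  rw [pv_load_chars_foldl, pv_gather_eq examples examples.length 0 examples.length rfl le_rfl]
  unfold pvSeg
  rw [List.drop_zero, Nat.sub_zero, List.take_length, PySem.Set.ofList_eq_foldl]
  rfl
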